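-- pv_equiv track=rewrite | github.com/rodrigoneal/Desafio-Viva-Decora | github/parser.py | sum_value_dict
-- ===== SOURCE A (Python) =====
-- def sum_value_dict(list_to_parser:list[dict], filter:list[str]) -> list[dict[str,tuple[int,int]]]:
--     """
--     Soma os valores  e salva num dicionario
--     :param list_to_parser: list
--     :param filter:list
--     :return list
--     """
--     temp_dict = {}
--     for key, value in list_to_parser:
--         if key in filter:
--             key = 'outros'
--         if key in temp_dict:
--             temp_dict[key] = [x + y for x, y in zip(temp_dict[key], value)]
--         else:
--             temp_dict[key] = value
--     return temp_dict
-- ===== SOURCE B (Python) =====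
-- def sum_value_dict(list_to_parser, filter):
--     """Collect-then-reduce: group value lists per (remapped) key, then fold each group."""
--     groups = {}
--     for key, value in list_to_parser:
--         k = 'outros' if key in filter else key
--         groups[k] = groups.get(k, []) + [value]
--     result = {}
--     for k, vs in groups.items():
--         acc = vs[0]
--         for v in vs[1:]:
--             acc = [x + y for x, y in zip(acc, v)]
--         result[k] = acc
--     return result
-- ===== Notes on version B (the rewrite author's own statement) =====
-- stated objective: alternative
-- what changed: Replaces A's single-pass running accumulation with a two-phase collect-then-reduce: first group each (remapped) key's value lists in encounter order, then fold every group's lists with the zip-sum combiner.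
import Mathlib
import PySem

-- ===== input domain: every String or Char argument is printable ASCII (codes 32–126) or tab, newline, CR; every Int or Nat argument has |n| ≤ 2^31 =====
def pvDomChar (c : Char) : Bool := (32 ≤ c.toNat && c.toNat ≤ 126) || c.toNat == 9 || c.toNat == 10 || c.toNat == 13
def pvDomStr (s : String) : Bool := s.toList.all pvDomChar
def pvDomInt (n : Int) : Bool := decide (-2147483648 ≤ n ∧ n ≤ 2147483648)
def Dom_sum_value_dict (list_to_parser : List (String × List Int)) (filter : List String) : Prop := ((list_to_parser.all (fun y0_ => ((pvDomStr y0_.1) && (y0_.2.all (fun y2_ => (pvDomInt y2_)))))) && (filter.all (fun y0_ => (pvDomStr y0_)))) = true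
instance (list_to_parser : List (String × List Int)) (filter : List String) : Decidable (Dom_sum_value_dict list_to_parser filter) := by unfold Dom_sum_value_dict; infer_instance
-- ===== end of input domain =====

-- B replaces A's single-pass running accumulation with a two-phase collect-then-reduce
-- decomposition (first group the value lists per remapped key, then fold each group); objective: alternative.

-- zip-sum, the pointwise combiner: [x + y for x, y in zip(a, b)]
def pvZipSum (a b : List Int) : List Int := (a.zip b).map (fun p => p.1 + p.2)

-- ===== PORT A =====
def sum_value_dict (list_to_parser : List (String × List Int)) (filter : List String) : List (String × List Int) :=
  (list_to_parser.foldl (fun d kv =>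
      let key := if kv.1 ∈ filter then "outros" else kv.1
      if d.contains key then d.insert key (pvZipSum (d.getD key []) kv.2)
      else d.insert key kv.2)
    PySem.Dict.empty).items

-- ===== PORT B =====
-- phase 1: groups[k] = groups.get(k, []) + [value]
def pvGroups (list_to_parser : List (String × List Int)) (filter : List String) :
    PySem.Dict String (List (List Int)) :=
  list_to_parser.foldl (fun g kv =>
      let k := if kv.1 ∈ filter then "outros" else kv.1
      g.insert k (g.getD k [] ++ [kv.2]))
    PySem.Dict.empty

-- phase 2 inner loop: acc = vs[0]; for v in vs[1:]: acc = zipsum(acc, v)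
def pvReduce (vs : List (List Int)) : List Int :=
  vs.tail.foldl pvZipSum (vs.headD [])

def sum_value_dict_alt (list_to_parser : List (String × List Int)) (filter : List String) : List (String × List Int) :=
  ((pvGroups list_to_parser filter).items.foldl
      (fun r kv => r.insert kv.1 (pvReduce kv.2)) PySem.Dict.empty).items

-- ===== PRECONDITION & SPEC =====
def Spec_sum_value_dict (list_to_parser : List (String × List Int)) (filter : List String) (out : List (String × List Int)) : Prop := out = sum_value_dict_alt list_to_parser filter
instance (list_to_parser : List (String × List Int)) (filter : List String) (out : List (String × List Int)) : Decidable (Spec_sum_value_dict list_to_parser filter out) := by unfold Spec_sum_value_dict; infer_instance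

-- ===== CLAIM (what is proved, stated in full; the proofs are below) =====
def Claim_equal_sum_value_dict : Prop := ∀ (list_to_parser : List (String × List Int)) (filter : List String), Dom_sum_value_dict list_to_parser filter → Spec_sum_value_dict list_to_parser filter (sum_value_dict list_to_parser filter)

-- ===== LEMMAS AND PROOFS =====

theorem pvReduce_append_singleton (vs : List (List Int)) (v : List Int) :
    pvReduce (vs ++ [v]) = if vs = [] then v else pvZipSum (pvReduce vs) v := by
  cases vs with
  | nil => simp [pvReduce]
  | cons w ws => simp [pvReduce, List.foldl_append]

-- rendering a groups dict into A's accumulator shape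
def pvRender (g : PySem.Dict String (List (List Int))) : PySem.Dict String (List Int) :=
  PySem.Dict.mk (g.items.map (fun kv => (kv.1, pvReduce kv.2)))

theorem keys_render (g : PySem.Dict String (List (List Int))) : (pvRender g).keys = g.keys := by
  simp [pvRender, PySem.Dict.keys, List.map_map]

theorem contains_render (g : PySem.Dict String (List (List Int))) (k : String) :
    (pvRender g).contains k = g.contains k := by
  rw [PySem.Dict.contains_eq_decide_mem_keys, PySem.Dict.contains_eq_decide_mem_keys, keys_render]

theorem getD_render (g : PySem.Dict String (List (List Int))) (k : String)
    (hn : g.keys.Nodup) (hc : g.contains k = true) :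
    (pvRender g).getD k [] = pvReduce (g.getD k []) := by
  have h1 : (g.get? k).isSome := by rw [← PySem.Dict.contains_eq_isSome_get?]; exact hc
  obtain ⟨vs, hvs⟩ := Option.isSome_iff_exists.mp h1
  have hmem := PySem.Dict.mem_items_of_get?_eq_some g hvs
  have hmem' : (k, pvReduce vs) ∈ (pvRender g).items := by
    simp only [pvRender]
    exact List.mem_map.mpr ⟨(k, vs), hmem, rfl⟩
  rw [PySem.Dict.getD_of_get?_eq_some g ([]) hvs,
      PySem.Dict.getD_of_mem_items (pvRender g) hmem' (by rw [keys_render]; exact hn)]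

theorem getD_ne_nil (g : PySem.Dict String (List (List Int)))
    (hv : ∀ p ∈ g.items, p.2 ≠ []) (k : String) (hc : g.contains k = true) :
    g.getD k [] ≠ [] := by
  have h1 : (g.get? k).isSome := by rw [← PySem.Dict.contains_eq_isSome_get?]; exact hc
  obtain ⟨vs, hvs⟩ := Option.isSome_iff_exists.mp h1
  rw [PySem.Dict.getD_of_get?_eq_some g ([]) hvs]
  exact hv _ (PySem.Dict.mem_items_of_get?_eq_some g hvs)

-- one A-step on the rendered dict is the rendering of one B-grouping-step
theorem step_render (g : PySem.Dict String (List (List Int))) (k : String) (v : List Int)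
    (hn : g.keys.Nodup) (hv : ∀ p ∈ g.items, p.2 ≠ []) :
    (if (pvRender g).contains k then (pvRender g).insert k (pvZipSum ((pvRender g).getD k []) v)
     else (pvRender g).insert k v)
    = pvRender (g.insert k (g.getD k [] ++ [v])) := by
  apply PySem.Dict.ext
  rw [contains_render]
  by_cases hc : g.contains k = true
  · rw [if_pos hc, getD_render g k hn hc]
    rw [PySem.Dict.items_insert, contains_render, hc, if_pos rfl]
    simp only [pvRender, PySem.Dict.items_insert, hc, if_true]
    rw [List.map_map, List.map_map]
    apply List.map_congr_left
    intro p hp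
    by_cases hk : p.1 = k
    · simp only [Function.comp, hk, beq_self_eq_true, if_pos]
      rw [pvReduce_append_singleton, if_neg (getD_ne_nil g hv k hc)]
    · simp only [Function.comp]
      rw [if_neg (by simpa using hk), if_neg (by simpa using hk)]
  · have hcf : g.contains k = false := by simpa using hc
    rw [if_neg hc, PySem.Dict.getD_of_not_contains g ([]) hcf, List.nil_append]
    rw [PySem.Dict.items_insert, contains_render, hcf]
    simp only [Bool.false_eq_true, if_false]
    simp only [pvRender, PySem.Dict.items_insert, hcf, Bool.false_eq_true, if_false]
    rw [List.map_append]
    rfl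

theorem nodup_insert_step (g : PySem.Dict String (List (List Int))) (k : String) (v : List Int)
    (hn : g.keys.Nodup) : (g.insert k (g.getD k [] ++ [v])).keys.Nodup := by
  by_cases hc : g.contains k = true
  · rw [PySem.Dict.keys_insert_of_contains g _ hc]; exact hn
  · have hcf : g.contains k = false := by simpa using hc
    have hk : k ∉ g.keys := by
      rw [PySem.Dict.contains_eq_decide_mem_keys] at hcf; simpa using hcf
    rw [PySem.Dict.keys_insert_of_not_contains g _ hcf]
    exact hn.append (List.nodup_singleton _) (by simpa [List.disjoint_singleton] using hk)

theorem nonnil_insert_step (g : PySem.Dict String (List (List Int))) (k : String) (v : List Int)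
    (hv : ∀ p ∈ g.items, p.2 ≠ []) :
    ∀ p ∈ (g.insert k (g.getD k [] ++ [v])).items, p.2 ≠ [] := by
  intro p hp
  rcases (PySem.Dict.mem_items_insert g k _ p).mp hp with h | ⟨h, _⟩
  · subst h; simp
  · exact hv p h

theorem main_invariant (l : List (String × List Int)) (filter : List String)
    (g : PySem.Dict String (List (List Int))) (hn : g.keys.Nodup)
    (hv : ∀ p ∈ g.items, p.2 ≠ []) :
    (l.foldl (fun d kv =>
        let key := if kv.1 ∈ filter then "outros" else kv.1
        if d.contains key then d.insert key (pvZipSum (d.getD key []) kv.2)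
        else d.insert key kv.2) (pvRender g))
    = pvRender (l.foldl (fun g kv =>
        let k := if kv.1 ∈ filter then "outros" else kv.1
        g.insert k (g.getD k [] ++ [kv.2])) g) := by
  induction l generalizing g with
  | nil => rfl
  | cons kv rest ih =>
    simp only [List.foldl_cons]
    rw [step_render g _ kv.2 hn hv]
    exact ih _ (nodup_insert_step g _ kv.2 hn) (nonnil_insert_step g _ kv.2 hv)

theorem nodup_keys_groups (l : List (String × List Int)) (filter : List String) :
    (pvGroups l filter).keys.Nodup := by
  unfold pvGroups
  exact PySem.Dict.nodup_keys_foldl_insert_key l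
    (fun kv => if kv.1 ∈ filter then "outros" else kv.1) _ _ PySem.Dict.nodup_keys_empty

-- ===== VERDICT (by name: the statement is the Claim_ definition above) =====
theorem sum_value_dict_spec : Claim_equal_sum_value_dict := by
  intro l filter _
  unfold Spec_sum_value_dict sum_value_dict sum_value_dict_alt
  have hrender := main_invariant l filter PySem.Dict.empty
    PySem.Dict.nodup_keys_empty (by intro p hp; simp [PySem.Dict.empty] at hp)
  have hempty : pvRender PySem.Dict.empty = PySem.Dict.empty := rfl
  rw [hempty] at hrender
  have hg : pvGroups l filter
      = l.foldl (fun g kv =>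
          let k := if kv.1 ∈ filter then "outros" else kv.1
          g.insert k (g.getD k [] ++ [kv.2])) PySem.Dict.empty := rfl
  rw [hrender, ← hg]
  rw [PySem.Dict.items_foldl_insert_fresh (pvGroups l filter).items
        (fun kv => kv.1) (fun kv => pvReduce kv.2) PySem.Dict.empty
        (by intro a _; exact PySem.Dict.contains_empty _)
        (by have := nodup_keys_groups l filter
            simpa [PySem.Dict.keys] using this)]
  simp [pvRender, PySem.Dict.empty]
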